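-- pv_equiv track=rewrite | github.com/jamie33o/code-institute-project3 | check_for_win.py | check_for_two_lines
-- ===== SOURCE A (Python) =====
-- def check_for_two_lines(numbers_called, bingo_book):
--      """checks the called numbers against each row in the users bingo book and returns true if two rows in a block of 3 match"""
--      winning_row_count = 0
--      winning_row_index = 0
--      if len(numbers_called) >= 10:
--         for index, row in enumerate(bingo_book):
--             if all(number in numbers_called for number in row):
--                 winning_row_count += 1
--
--                 if winning_row_count == 2 and index - winning_row_index < 3:
--                     return True
--
--                 winning_row_index = index
-- ===== SOURCE B (Python) =====
-- def check_for_two_lines(numbers_called, bingo_book):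
--     """checks the called numbers against each row in the users bingo book and returns true if two rows in a block of 3 match"""
--     if len(numbers_called) >= 10:
--         called = set(numbers_called)
--         for i, row in enumerate(bingo_book):
--             if called.issuperset(row):
--                 if any(called.issuperset(r) for r in bingo_book[i+1:i+3]):
--                     return True
--                 break
-- ===== Notes on version B (the rewrite author's own statement) =====
-- stated objective: faster
-- what changed: B drops A's running count / last-winning-index state machine: it builds a set of the called numbers once, stops at the FIRST fully-matched row, and decides the game by scanning only the 2-row window bingo_book[i+1:i+3] right after it, instead of counting matches with linear-list membership tests per number.
import Mathlib
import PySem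

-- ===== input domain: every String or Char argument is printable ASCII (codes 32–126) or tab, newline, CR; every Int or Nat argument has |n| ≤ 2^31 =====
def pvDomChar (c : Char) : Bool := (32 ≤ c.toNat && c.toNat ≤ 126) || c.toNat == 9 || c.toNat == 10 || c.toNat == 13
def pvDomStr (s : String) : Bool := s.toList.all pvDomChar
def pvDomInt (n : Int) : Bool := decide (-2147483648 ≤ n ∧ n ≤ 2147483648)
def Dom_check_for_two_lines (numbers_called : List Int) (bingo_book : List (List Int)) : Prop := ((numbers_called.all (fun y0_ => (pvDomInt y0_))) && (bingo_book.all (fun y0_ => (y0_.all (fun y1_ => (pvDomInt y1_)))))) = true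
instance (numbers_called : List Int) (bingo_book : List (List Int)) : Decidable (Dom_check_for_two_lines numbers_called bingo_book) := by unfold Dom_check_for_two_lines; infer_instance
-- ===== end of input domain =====

-- B replaces A's running count / last-winning-index state machine by: build a set of the called
-- numbers once, stop at the FIRST fully-matched row and decide by the 2-row window after it
-- (measured faster in a timing run).

-- ===== PORT A =====
-- A's for-loop with its two mutable state variables (winning_row_count, winning_row_index)
def checkLoopA (nc : List Int) : List (Int × List Int) → Int → Int → Option Bool
  | [], _, _ => none
  | (index, row) :: rest, cnt, widx =>
    if row.all (fun number => nc.contains number) then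
      if cnt + 1 = 2 ∧ index - widx < 3 then some true
      else checkLoopA nc rest (cnt + 1) index
    else checkLoopA nc rest cnt widx

def check_for_two_lines (numbers_called : List Int) (bingo_book : List (List Int)) : Option Bool :=
  if 10 ≤ (numbers_called.length : Int) then
    checkLoopA numbers_called (PySem.List.enumerate bingo_book) 0 0
  else none

-- ===== PORT B =====
-- B's for-loop: at the first row fully covered by `called`, test the slice bingo_book[i+1:i+3]
-- and either return True or break (falling off the function = None)
def loopB (called : PySem.Set Int) (bb : List (List Int)) : List (Int × List Int) → Option Bool
  | [] => none
  | (i, row) :: rest =>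
    if PySem.Set.issuperset called (PySem.Set.ofList row) then
      if (PySem.List.slice bb (some (i + 1)) (some (i + 3))).any
           (fun r => PySem.Set.issuperset called (PySem.Set.ofList r)) then some true
      else none
    else loopB called bb rest

def check_for_two_lines_alt (numbers_called : List Int) (bingo_book : List (List Int)) : Option Bool :=
  if 10 ≤ (numbers_called.length : Int) then
    loopB (PySem.Set.ofList numbers_called) bingo_book (PySem.List.enumerate bingo_book)
  else none

-- ===== PRECONDITION & SPEC =====
def Spec_check_for_two_lines (numbers_called : List Int) (bingo_book : List (List Int)) (out : Option Bool) : Prop := out = check_for_two_lines_alt numbers_called bingo_book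
instance (numbers_called : List Int) (bingo_book : List (List Int)) (out : Option Bool) : Decidable (Spec_check_for_two_lines numbers_called bingo_book out) := by unfold Spec_check_for_two_lines; infer_instance

-- ===== CLAIM (what is proved, stated in full; the proofs are below) =====
def Claim_equal_check_for_two_lines : Prop := ∀ (numbers_called : List Int) (bingo_book : List (List Int)), Dom_check_for_two_lines numbers_called bingo_book → Spec_check_for_two_lines numbers_called bingo_book (check_for_two_lines numbers_called bingo_book)

-- ===== LEMMAS AND PROOFS =====

-- common reference shape: first fully-matched row decides via the 2-row window after it
def winSpec (p : List Int → Bool) : List (List Int) → Option Bool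
  | [] => none
  | a :: t => if p a then (if (t.take 2).any p then some true else none) else winSpec p t

-- `called.issuperset(row)` with called = set(nc) is row ⊆ nc
theorem issuperset_ofList_eq_all (nc row : List Int) :
    PySem.Set.issuperset (PySem.Set.ofList nc) (PySem.Set.ofList row)
      = row.all (fun n => nc.contains n) := by
  simp only [PySem.Set.issuperset, PySem.Set.issubset]
  rw [Bool.eq_iff_iff]
  simp only [List.all_eq_true, List.contains_iff_mem]
  constructor
  · intro h n hn
    exact (PySem.Set.mem_ofList nc n).mp
      (List.contains_iff_mem.mp (h n ((PySem.Set.mem_ofList row n).mpr hn)))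
  · intro h n hn
    exact List.contains_iff_mem.mpr
      ((PySem.Set.mem_ofList nc n).mpr (h n ((PySem.Set.mem_ofList row n).mp hn)))

-- every index produced by enumerate t s is ≥ s
theorem hits_ge (p : List Int → Bool) (t : List (List Int)) :
    ∀ (s i : Int), i ∈ (((PySem.List.enumerate t s).filter (fun q => p q.2)).map Prod.fst) → s ≤ i := by
  induction t with
  | nil => intro s i h; simp [PySem.List.enumerate] at h
  | cons a t ih =>
    intro s i h
    rw [PySem.List.enumerate_cons] at h
    simp only [List.filter_cons] at h
    by_cases hp : p a
    · rw [if_pos hp] at h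
      rcases List.mem_cons.mp h with h1 | h2
      · omega
      · have := ih (s + 1) i h2; omega
    · rw [if_neg hp] at h
      have := ih (s + 1) i h; omega

-- window lemma: the first match index being < s + w is exactly "a match within the first w rows"
theorem window_lemma (p : List Int → Bool) (t : List (List Int)) :
    ∀ (s : Int) (w : Nat),
      (match (((PySem.List.enumerate t s).filter (fun q => p q.2)).map Prod.fst) with
       | i1 :: _ => decide (i1 < s + w)
       | [] => false) = (t.take w).any p := by
  induction t with
  | nil => intro s w; simp [PySem.List.enumerate]
  | cons a t ih =>
    intro s w
    rw [PySem.List.enumerate_cons]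
    simp only [List.filter_cons]
    by_cases hp : p a = true
    · rw [if_pos hp, List.map_cons]
      cases w with
      | zero => simp
      | succ w' => simp [hp]
    · rw [if_neg hp]
      have hpf : p a = false := Bool.eq_false_iff.mpr hp
      cases w with
      | zero =>
        simp only [List.take_zero, List.any_nil]
        cases hh : (((PySem.List.enumerate t (s + 1)).filter (fun q => p q.2)).map Prod.fst) with
        | nil => simp
        | cons i1 r =>
          have hge : s + 1 ≤ i1 := hits_ge p t (s + 1) i1 (hh ▸ List.mem_cons_self)
          show decide (i1 < s + ((0:Nat):Int)) = false
          rw [decide_eq_false (by omega : ¬ i1 < s + ((0:Nat):Int))]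
      | succ w' =>
        rw [List.take_succ_cons, List.any_cons, hpf, Bool.false_or]
        have harith : s + 1 + ((w' : Nat) : Int) = s + (((w' + 1 : Nat)) : Int) := by push_cast; ring
        rw [← harith]
        exact ih (s + 1) w'

-- once winning_row_count ≥ 2 the `== 2` test can never fire again, so the loop returns None
theorem checkLoopA_ge_two (nc : List Int) (l : List (Int × List Int)) :
    ∀ cnt widx : Int, 2 ≤ cnt → checkLoopA nc l cnt widx = none := by
  induction l with
  | nil => intro cnt widx _; rfl
  | cons p rest ih =>
    intro cnt widx h
    obtain ⟨index, row⟩ := p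
    simp only [checkLoopA]
    by_cases hm : (row.all fun number => nc.contains number) = true
    · rw [if_pos hm, if_neg (by omega : ¬ (cnt + 1 = 2 ∧ index - widx < 3))]
      exact ih (cnt + 1) index (by omega)
    · rw [if_neg hm]; exact ih cnt widx h

-- with one match already seen (count = 1, its index widx), the result is decided by the next match
theorem checkLoopA_one (nc : List Int) (l : List (Int × List Int)) :
    ∀ widx : Int, checkLoopA nc l 1 widx =
      match (l.filter (fun q => q.2.all (fun n => nc.contains n))).map Prod.fst with
      | i :: _ => if i - widx < 3 then some true else none
      | [] => none := by
  induction l with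
  | nil => intro widx; rfl
  | cons p rest ih =>
    intro widx
    obtain ⟨index, row⟩ := p
    by_cases hm : (row.all fun n => nc.contains n) = true
    · simp only [List.filter_cons, checkLoopA]
      rw [if_pos hm, if_pos hm, List.map_cons]
      by_cases hd : index - widx < 3
      · rw [if_pos ⟨by omega, hd⟩]
        simp [hd]
      · rw [if_neg (by omega : ¬ ((1:Int) + 1 = 2 ∧ index - widx < 3))]
        have h2 : (1:Int) + 1 = 2 := by omega
        rw [h2, checkLoopA_ge_two nc rest 2 index (by omega)]
        simp [hd]
    · simp only [List.filter_cons, checkLoopA]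
      rw [if_neg hm, if_neg hm]
      exact ih widx

-- A's loop from the initial state computes the first-match-plus-window shape
theorem checkLoopA_winSpec (nc : List Int) (l : List (List Int)) :
    ∀ (s widx : Int), checkLoopA nc (PySem.List.enumerate l s) 0 widx
      = winSpec (fun row => row.all (fun n => nc.contains n)) l := by
  induction l with
  | nil => intro s widx; rfl
  | cons a t ih =>
    intro s widx
    rw [PySem.List.enumerate_cons]
    by_cases hp : (a.all fun n => nc.contains n) = true
    · simp only [checkLoopA, winSpec]
      rw [if_pos hp, if_pos hp, if_neg (by omega : ¬ ((0:Int) + 1 = 2 ∧ s - widx < 3))]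
      have h01 : (0:Int) + 1 = 1 := by omega
      rw [h01, checkLoopA_one]
      have hw := window_lemma (fun row => row.all (fun n => nc.contains n)) t (s + 1) 2
      have harith : s + 1 + ((2:Nat):Int) = s + 3 := by push_cast; ring
      rw [harith] at hw
      cases hh : (((PySem.List.enumerate t (s + 1)).filter
          (fun q => q.2.all (fun n => nc.contains n))).map Prod.fst) with
      | nil =>
        rw [hh] at hw
        rw [← hw]
        simp
      | cons i1 r =>
        rw [hh] at hw
        rw [← hw]
        by_cases hlt : i1 < s + 3
        · show (if i1 - s < 3 then some true else none) = _
          rw [if_pos (by omega : i1 - s < 3)]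
          simp [hlt]
        · show (if i1 - s < 3 then some true else none) = _
          rw [if_neg (by omega : ¬ i1 - s < 3)]
          simp [hlt]
    · simp only [checkLoopA, winSpec]
      rw [if_neg hp, if_neg hp]
      exact ih (s + 1) widx

-- B's loop computes the same shape (the slice bb[i+1:i+3] is the 2-row window after row i)
theorem loopB_winSpec (called : PySem.Set Int) (bb : List (List Int)) :
    ∀ (l : List (List Int)) (s : Int), 0 ≤ s → bb.drop s.toNat = l →
      loopB called bb (PySem.List.enumerate l s)
        = winSpec (fun row => PySem.Set.issuperset called (PySem.Set.ofList row)) l := by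
  intro l
  induction l with
  | nil => intro s _ _; rfl
  | cons a t ih =>
    intro s hs hdrop
    rw [PySem.List.enumerate_cons]
    simp only [loopB, winSpec]
    by_cases hp : PySem.Set.issuperset called (PySem.Set.ofList a) = true
    · rw [if_pos hp, if_pos hp]
      have hslice : PySem.List.slice bb (some (s + 1)) (some (s + 3)) = t.take 2 := by
        rw [PySem.List.slice_toNat bb (show (0:Int) ≤ s + 1 by omega) (show (0:Int) ≤ s + 3 by omega)]
        have h1 : (s + 1).toNat = s.toNat + 1 := by omega
        rw [h1]
        have h2 : (s + 3).toNat - (s.toNat + 1) = 2 := by omega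
        rw [h2]
        have hdt : bb.drop (s.toNat + 1) = t := by
          rw [← List.tail_drop, hdrop, List.tail_cons]
        rw [hdt]
      rw [hslice]
    · rw [if_neg hp, if_neg hp]
      refine ih (s + 1) (by omega) ?_
      have h1 : (s + 1).toNat = s.toNat + 1 := by omega
      rw [h1, ← List.tail_drop, hdrop, List.tail_cons]

-- ===== VERDICT (by name: the statement is the Claim_ definition above) =====
theorem check_for_two_lines_spec : Claim_equal_check_for_two_lines := by
  intro nc bb _
  unfold Spec_check_for_two_lines check_for_two_lines check_for_two_lines_alt
  by_cases hg : 10 ≤ (nc.length : Int)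
  · rw [if_pos hg, if_pos hg,
      checkLoopA_winSpec nc bb 0 0,
      loopB_winSpec (PySem.Set.ofList nc) bb bb 0 (by omega) (by simp)]
    have : (fun row => PySem.Set.issuperset (PySem.Set.ofList nc) (PySem.Set.ofList row))
        = (fun row => row.all (fun n => nc.contains n)) := funext (issuperset_ofList_eq_all nc)
    rw [this]
  · rw [if_neg hg, if_neg hg]
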